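-- pv_equiv track=rewrite | github.com/simonmesserli/ntc-unified-baseline-migration-tool | ntc_state_migration.py | format_hcl
-- ===== SOURCE A (Python) =====
-- def format_hcl(results, include_comments=True):
--     """Format results as HCL baseline_moved_resources block."""
--     lines = []
--     lines.append("  baseline_moved_resources = [")
--
--     # Group by category for readable output
--     categories = [
--         ("global_no_count", "GLOBAL RESOURCES — [0] index removed (no count in unified)"),
--         ("global_with_count", "GLOBAL RESOURCES — [0] index kept (count still in unified)"),
--         ("regional", "REGIONAL RESOURCES — for_each with [\"<region>\"] key"),
--         ("global_heuristic", "GLOBAL RESOURCES — heuristic (VERIFY MANUALLY!)"),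
--     ]
--
--     for cat_key, cat_title in categories:
--         cat_results = [r for r in results if r["category"] == cat_key]
--         if not cat_results:
--             continue
--
--         if include_comments:
--             lines.append("")
--             lines.append(f"    # {'=' * 70}")
--             lines.append(f"    # {cat_title}")
--             lines.append(f"    # {'=' * 70}")
--
--         # Group by resource_id for sub-headers
--         current_resource = None
--         for r in sorted(cat_results, key=lambda x: (x["resource_id"], x["region"])):
--             if include_comments and r["resource_id"] != current_resource:
--                 current_resource = r["resource_id"]
--                 lines.append("")
--                 lines.append(f"    # {r['resource_id']}")
--
--             lines.append("    {")
--             lines.append(f'      moved_from = "{r["from_addr"]}"')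
--             lines.append(f'      moved_to   = "{r["to_addr"]}"')
--             lines.append("    },")
--
--     lines.append("  ]")
--     return "\n".join(lines)
-- ===== SOURCE B (Python) =====
-- def format_hcl(results, include_comments=True):
--     """Format results as HCL baseline_moved_resources block.
--
--     One grouping pass over the results instead of one filtering pass per
--     category; rows are then emitted run-by-run (a run = consecutive rows
--     with the same resource_id after sorting) instead of tracking a
--     current_resource sentinel.
--     """
--     groups = {}
--     for r in results:
--         groups.setdefault(r["category"], []).append(r)
--
--     bar = "    # " + "=" * 70
--
--     def block(r):
--         return ["    {",
--                 '      moved_from = "' + r["from_addr"] + '"',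
--                 '      moved_to   = "' + r["to_addr"] + '"',
--                 "    },"]
--
--     lines = ["  baseline_moved_resources = ["]
--     for cat_key, cat_title in (
--         ("global_no_count", "GLOBAL RESOURCES — [0] index removed (no count in unified)"),
--         ("global_with_count", "GLOBAL RESOURCES — [0] index kept (count still in unified)"),
--         ("regional", "REGIONAL RESOURCES — for_each with [\"<region>\"] key"),
--         ("global_heuristic", "GLOBAL RESOURCES — heuristic (VERIFY MANUALLY!)"),
--     ):
--         rows = groups.get(cat_key, [])
--         if not rows:
--             continue
--         if include_comments:
--             lines += ["", bar, "    # " + cat_title, bar]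
--         rows = sorted(rows, key=lambda x: (x["resource_id"], x["region"]))
--         while rows:
--             rid = rows[0]["resource_id"]
--             k = 1
--             while k < len(rows) and rows[k]["resource_id"] == rid:
--                 k += 1
--             if include_comments:
--                 lines += ["", "    # " + rid]
--             for r in rows[:k]:
--                 lines += block(r)
--             rows = rows[k:]
--     lines.append("  ]")
--     return "\n".join(lines)
-- ===== Notes on version B (the rewrite author's own statement) =====
-- stated objective: alternative
-- what changed: B builds one grouping dict over results instead of A's four per-category filtering passes, and emits the sorted rows run-by-run (slicing maximal equal-resource_id runs) instead of A's stateful current_resource sentinel loop.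
import Mathlib
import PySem

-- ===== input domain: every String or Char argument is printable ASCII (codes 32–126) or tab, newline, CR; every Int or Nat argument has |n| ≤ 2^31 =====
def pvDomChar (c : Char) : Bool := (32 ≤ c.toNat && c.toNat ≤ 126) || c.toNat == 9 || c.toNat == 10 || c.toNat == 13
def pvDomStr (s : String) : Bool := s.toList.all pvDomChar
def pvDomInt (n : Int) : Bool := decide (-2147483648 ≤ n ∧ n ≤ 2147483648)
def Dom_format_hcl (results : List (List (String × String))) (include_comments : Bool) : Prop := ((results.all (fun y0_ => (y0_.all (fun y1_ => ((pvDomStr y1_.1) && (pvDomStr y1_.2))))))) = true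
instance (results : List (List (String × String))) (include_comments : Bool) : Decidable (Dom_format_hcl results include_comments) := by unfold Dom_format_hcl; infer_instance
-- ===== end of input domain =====

-- B replaces A's four per-category filtering passes by one grouping pass over the results
-- and emits the sorted rows run-by-run instead of tracking a current_resource sentinel (objective: alternative).
-- Both Pythons only read `results`; neither mutates its arguments.

-- shared helpers: dict lookup r[k] (first match; Pre_ guarantees presence) and the category table
def fhGet (r : List (String × String)) (k : String) : String :=
  (PySem.Dict.mk r).getD k ""

def fhCats : List (String × String) :=
  [("global_no_count", "GLOBAL RESOURCES — [0] index removed (no count in unified)"),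
   ("global_with_count", "GLOBAL RESOURCES — [0] index kept (count still in unified)"),
   ("regional", "REGIONAL RESOURCES — for_each with [\"<region>\"] key"),
   ("global_heuristic", "GLOBAL RESOURCES — heuristic (VERIFY MANUALLY!)")]

-- ===== PORT A =====
-- A's inner per-row loop body: emit a sub-header when resource_id changes, then the block
def fhStepA (ic : Bool) (st : List String × Option String) (r : List (String × String)) :
    List String × Option String :=
  let st :=
    if ic && (some (fhGet r "resource_id") != st.2) then
      (st.1 ++ ["", "    # " ++ fhGet r "resource_id"], some (fhGet r "resource_id"))
    else st
  (st.1 ++ ["    {",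
            "      moved_from = \"" ++ fhGet r "from_addr" ++ "\"",
            "      moved_to   = \"" ++ fhGet r "to_addr" ++ "\"",
            "    },"], st.2)

-- A's per-category loop body: filter the category, skip if empty, banner, stateful row loop
def fhCatStepA (results : List (List (String × String))) (ic : Bool)
    (lines : List String) (ct : String × String) : List String :=
  let cat_results := results.filter (fun r => fhGet r "category" == ct.1)
  if cat_results.isEmpty then lines
  else
    let lines :=
      if ic then
        lines ++ ["", "    # " ++ String.ofList (List.replicate 70 '='), "    # " ++ ct.2,
                  "    # " ++ String.ofList (List.replicate 70 '=')]
      else lines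
    ((PySem.List.sorted2 cat_results (fun x => fhGet x "resource_id")
        (fun x => fhGet x "region")).foldl (fhStepA ic) (lines, (none : Option String))).1

def format_hcl (results : List (List (String × String))) (include_comments : Bool) : String :=
  let lines : List String := ["  baseline_moved_resources = ["]
  let lines := fhCats.foldl (fhCatStepA results include_comments) lines
  PySem.Str.join "\n" (lines ++ ["  ]"])

-- ===== PORT B =====
def fhBlock (r : List (String × String)) : List String :=
  ["    {",
   "      moved_from = \"" ++ fhGet r "from_addr" ++ "\"",
   "      moved_to   = \"" ++ fhGet r "to_addr" ++ "\"",
   "    },"]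

-- grouping pass: groups.setdefault(r["category"], []).append(r)
def fhGroups (results : List (List (String × String))) :
    PySem.Dict String (List (List (String × String))) :=
  results.foldl (fun d r => d.modify (fhGet r "category") [] (· ++ [r])) PySem.Dict.empty

-- run-by-run emission over the sorted rows (a run = the leading rows sharing head's resource_id)
def fhRuns (ic : Bool) : List (List (String × String)) → List String
  | [] => []
  | r :: rs =>
    let rid := fhGet r "resource_id"
    let run := r :: rs.takeWhile (fun x => fhGet x "resource_id" == rid)
    let rest := rs.dropWhile (fun x => fhGet x "resource_id" == rid)
    (if ic then ["", "    # " ++ rid] else []) ++ run.flatMap fhBlock ++ fhRuns ic rest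
  termination_by rows => rows.length
  decreasing_by simpa using Nat.lt_succ_of_le (List.length_dropWhile_le _ _)

def fhCatStepB (groups : PySem.Dict String (List (List (String × String)))) (ic : Bool)
    (lines : List String) (ct : String × String) : List String :=
  let rows := groups.getD ct.1 []
  if rows.isEmpty then lines
  else
    let bar := "    # " ++ String.ofList (List.replicate 70 '=')
    lines ++ (if ic then ["", bar, "    # " ++ ct.2, bar] else [])
          ++ fhRuns ic (PySem.List.sorted2 rows (fun x => fhGet x "resource_id")
               (fun x => fhGet x "region"))

def format_hcl_alt (results : List (List (String × String))) (include_comments : Bool) : String :=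
  let groups := fhGroups results
  let lines := fhCats.foldl (fhCatStepB groups include_comments)
    ["  baseline_moved_resources = ["]
  PySem.Str.join "\n" (lines ++ ["  ]"])

-- ===== PRECONDITION & SPEC =====
def fhHas (r : List (String × String)) (k : String) : Bool := r.any (fun p => p.1 == k)

-- Pre_ excludes exactly the inputs on which the Python A raises KeyError: every row must
-- carry a "category" key, and rows of one of the four emitted categories must also carry
-- "resource_id", "region", "from_addr" and "to_addr".
def Pre_format_hcl (results : List (List (String × String))) (include_comments : Bool) : Prop :=
  (results.all (fun r =>
    fhHas r "category" &&
      (!(fhCats.any (fun c => c.1 == fhGet r "category")) ||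
        (fhHas r "resource_id" && fhHas r "region" && fhHas r "from_addr" && fhHas r "to_addr")))) = true
instance (results : List (List (String × String))) (include_comments : Bool) : Decidable (Pre_format_hcl results include_comments) := by unfold Pre_format_hcl; infer_instance

def pvWitness_format_hcl : (List (List (String × String))) × Bool :=
  ([[("category", "regional"), ("resource_id", "vpc"), ("region", "eu"),
     ("from_addr", "module.a.x"), ("to_addr", "module.b.x")],
    [("category", "ignored")]], true)

def Spec_format_hcl (results : List (List (String × String))) (include_comments : Bool) (out : String) : Prop := out = format_hcl_alt results include_comments
instance (results : List (List (String × String))) (include_comments : Bool) (out : String) : Decidable (Spec_format_hcl results include_comments out) := by unfold Spec_format_hcl; infer_instance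

-- ===== CLAIM (what is proved, stated in full; the proofs are below) =====
def Claim_equal_format_hcl : Prop := ∀ (results : List (List (String × String))) (include_comments : Bool), Dom_format_hcl results include_comments → Pre_format_hcl results include_comments → Spec_format_hcl results include_comments (format_hcl results include_comments)

-- ===== LEMMAS AND PROOFS =====

-- the grouping pass collects exactly A's per-category filter, in order
theorem fhGroups_getD (results : List (List (String × String))) (k : String) :
    (fhGroups results).getD k [] = results.filter (fun r => fhGet r "category" == k) := by
  suffices h : ∀ d : PySem.Dict String (List (List (String × String))),
      (results.foldl (fun d r => d.modify (fhGet r "category") [] (· ++ [r])) d).getD k []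
        = d.getD k [] ++ results.filter (fun r => fhGet r "category" == k) by
    simpa [fhGroups] using h PySem.Dict.empty
  induction results with
  | nil => simp
  | cons r rs ih =>
    intro d
    simp only [List.foldl_cons, List.filter_cons]
    by_cases hk : fhGet r "category" = k
    · subst hk
      simp [ih, PySem.Dict.getD_modify_self]
    · rw [ih, PySem.Dict.getD_modify_of_ne _ _ _ (fun h => hk h.symm)]
      simp [hk]

theorem head_dropWhile_false {α : Type} (p : α → Bool) (l : List α) {x : α} {xs : List α}
    (h : l.dropWhile p = x :: xs) : p x = false := by
  induction l with
  | nil => simp at h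
  | cons a l ih =>
    by_cases hp : p a
    · rw [List.dropWhile_cons_of_pos hp] at h; exact ih h
    · rw [List.dropWhile_cons_of_neg hp] at h
      cases h; simpa using hp

-- a run whose rows never fire the sub-header condition only appends blocks
theorem fhRun_foldl (ic : Bool) (cur : Option String) (run : List (List (String × String)))
    (h : ∀ x ∈ run, (ic && (some (fhGet x "resource_id") != cur)) = false) :
    ∀ lines, run.foldl (fhStepA ic) (lines, cur) = (lines ++ run.flatMap fhBlock, cur) := by
  induction run with
  | nil => simp
  | cons r rs ih =>
    intro lines
    have hr := h r (by simp)
    have hstep : fhStepA ic (lines, cur) r = (lines ++ fhBlock r, cur) := by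
      simp [fhStepA, hr, fhBlock]
    rw [List.foldl_cons, hstep, ih (fun x hx => h x (by simp [hx]))]
    simp

theorem fhRuns_false (rows : List (List (String × String))) :
    fhRuns false rows = rows.flatMap fhBlock := by
  induction hn : rows.length using Nat.strong_induction_on generalizing rows with
  | _ n ih =>
    cases rows with
    | nil => simp [fhRuns]
    | cons r rs =>
      rw [fhRuns]
      have hlt : (rs.dropWhile (fun x => fhGet x "resource_id" == fhGet r "resource_id")).length < n := by
        subst hn
        simpa using Nat.lt_succ_of_le (List.length_dropWhile_le _ _)
      rw [ih _ hlt _ rfl]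
      simp only [Bool.false_eq_true, if_false, List.nil_append, List.flatMap_cons,
        List.append_assoc, ← List.flatMap_append, List.takeWhile_append_dropWhile]

theorem fhInner_false (rows : List (List (String × String))) (lines : List String)
    (cur : Option String) :
    (rows.foldl (fhStepA false) (lines, cur)).1 = lines ++ fhRuns false rows := by
  rw [fhRuns_false, fhRun_foldl false cur rows (by simp)]

theorem fhInner_true (rows : List (List (String × String))) :
    ∀ (lines : List String) (cur : Option String),
      (∀ r rs', rows = r :: rs' → cur ≠ some (fhGet r "resource_id")) →
      (rows.foldl (fhStepA true) (lines, cur)).1 = lines ++ fhRuns true rows := by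
  induction hn : rows.length using Nat.strong_induction_on generalizing rows with
  | _ n ih =>
    cases rows with
    | nil => simp [fhRuns]
    | cons r rs =>
      intro lines cur hcur
      have hne : cur ≠ some (fhGet r "resource_id") := hcur r rs rfl
      rw [fhRuns]
      set rid := fhGet r "resource_id" with hrid
      set run := rs.takeWhile (fun x => fhGet x "resource_id" == rid) with hrun
      set rest := rs.dropWhile (fun x => fhGet x "resource_id" == rid) with hrest
      have hsplit : rs = run ++ rest := (List.takeWhile_append_dropWhile).symm
      -- first step fires the header
      have hc : (some (fhGet r "resource_id") != cur) = true :=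
        bne_iff_ne.mpr (fun h => hne h.symm)
      have hstep : fhStepA true (lines, cur) r
          = (lines ++ ["", "    # " ++ rid] ++ fhBlock r, some rid) := by
        simp [fhStepA, fhBlock, hc]
        exact hrid.symm
      rw [List.foldl_cons, hstep, hsplit, List.foldl_append]
      -- the run appends only blocks
      rw [fhRun_foldl true (some rid) run
        (fun x hx => by
          have hx' := List.mem_takeWhile_imp hx
          simp only [beq_iff_eq] at hx'
          simp [hx']) _]
      -- the rest starts a fresh run
      have hrest_len : rest.length < n := by
        subst hn; simpa [hrest] using Nat.lt_succ_of_le (List.length_dropWhile_le _ _)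
      rw [ih _ hrest_len _ rfl _ _ ?_]
      · simp
      · intro r' rs' hr'
        have hdf := head_dropWhile_false _ rs (hrest ▸ hr')
        intro hceq
        have heq : fhGet r' "resource_id" = rid := by injection hceq with h; exact h.symm
        simp [heq] at hdf

theorem fhCatStep_eq (results : List (List (String × String))) (ic : Bool)
    (lines : List String) (ct : String × String) :
    fhCatStepA results ic lines ct = fhCatStepB (fhGroups results) ic lines ct := by
  simp only [fhCatStepA, fhCatStepB, fhGroups_getD]
  by_cases he : (results.filter (fun r => fhGet r "category" == ct.1)).isEmpty
  · simp [he]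
  · simp only [he, Bool.false_eq_true, if_false]
    cases ic with
    | false => rw [fhInner_false]; simp
    | true =>
      rw [fhInner_true _ _ none (by intro _ _ _; simp)]
      simp

-- ===== VERDICT (by name: the statement is the Claim_ definition above) =====
theorem format_hcl_spec : Claim_equal_format_hcl := by
  intro results ic _ _
  unfold Spec_format_hcl format_hcl format_hcl_alt
  have h : ∀ lines, fhCats.foldl (fhCatStepA results ic) lines
      = fhCats.foldl (fhCatStepB (fhGroups results) ic) lines := by
    intro lines
    simp only [fhCats, List.foldl_cons, List.foldl_nil, fhCatStep_eq]
  simp only [h]
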